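-- pv_equiv track=rewrite | github.com/adi-uchiha/thought-tap | test.py | to_binary_string
-- ===== SOURCE A (Python) =====
-- def is_vowel(ch):
--     vowels = "aeiou"
--     return ch in vowels
--
-- def to_binary_string(s):
--     binary_string = ""
--     for char in s:
--         if is_vowel(char):
--             binary_string += "0"
--         else:
--             binary_string += "1"
--     return binary_string.lstrip('0')
-- ===== SOURCE B (Python) =====
-- def is_vowel(ch):
--     vowels = "aeiou"
--     return ch in vowels
--
-- def to_binary_string(s):
--     i = 0
--     n = len(s)
--     while i < n and is_vowel(s[i]):
--         i += 1
--     return ''.join('0' if is_vowel(c) else '1' for c in s[i:])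
-- ===== Notes on version B (the rewrite author's own statement) =====
-- stated objective: simpler
-- what changed: B skips the leading run of vowels first and then maps only the remaining characters into the result in one join, instead of building the full bit string by repeated concatenation and stripping the leading zeros afterwards.
import Mathlib
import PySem

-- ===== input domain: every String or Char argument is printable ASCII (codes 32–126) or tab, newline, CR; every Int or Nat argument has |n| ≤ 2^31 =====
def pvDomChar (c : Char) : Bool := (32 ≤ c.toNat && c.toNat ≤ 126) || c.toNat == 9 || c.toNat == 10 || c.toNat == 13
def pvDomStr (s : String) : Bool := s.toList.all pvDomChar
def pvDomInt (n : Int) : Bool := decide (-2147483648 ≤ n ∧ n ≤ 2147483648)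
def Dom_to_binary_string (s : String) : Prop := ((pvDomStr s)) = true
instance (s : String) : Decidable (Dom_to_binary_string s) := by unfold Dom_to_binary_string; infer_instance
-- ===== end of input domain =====

-- B skips the leading run of vowels, then maps the rest to '0'/'1' in one pass,
-- instead of A's build-full-string-by-concatenation then lstrip('0'). Objective: simpler.


-- shared helper (identical in both Python sources): ch in "aeiou" for a single char = membership
def is_vowel (ch : Char) : Bool := ("aeiou".toList).contains ch

-- ===== PORT A =====
-- builds the bit string char by char (kept as List Char), then lstrip('0')
-- lstrip('0') = drop leading chars belonging to {'0'}: exact as dropWhile (· = '0')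
def to_binary_string (s : String) : String :=
  let binary_string :=
    s.toList.foldl (fun acc c => acc ++ [if is_vowel c then '0' else '1']) []
  String.mk (binary_string.dropWhile (fun c => c = '0'))

-- ===== PORT B =====
-- the while-loop skip of the leading vowel run
def pvSkipVowels : List Char → List Char
  | [] => []
  | c :: rest => if is_vowel c then pvSkipVowels rest else c :: rest

def to_binary_string_alt (s : String) : String :=
  String.mk ((pvSkipVowels s.toList).map (fun c => if is_vowel c then '0' else '1'))

-- ===== PRECONDITION & SPEC =====
def Spec_to_binary_string (s : String) (out : String) : Prop := out = to_binary_string_alt s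
instance (s : String) (out : String) : Decidable (Spec_to_binary_string s out) := by unfold Spec_to_binary_string; infer_instance

-- ===== CLAIM (what is proved, stated in full; the proofs are below) =====
def Claim_equal_to_binary_string : Prop := ∀ (s : String), Dom_to_binary_string s → Spec_to_binary_string s (to_binary_string s)

-- ===== LEMMAS AND PROOFS =====

theorem pv_dropWhile_eq_skip (l : List Char) :
    l.dropWhile is_vowel = pvSkipVowels l := by
  induction l with
  | nil => rfl
  | cons c rest ih =>
    simp only [List.dropWhile, pvSkipVowels]
    cases h : is_vowel c <;> simp [ih]

theorem pv_bit_pred (c : Char) :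
    (decide ((if is_vowel c then '0' else '1') = '0')) = is_vowel c := by
  cases h : is_vowel c <;> simp [h]

-- ===== VERDICT (by name: the statement is the Claim_ definition above) =====
theorem to_binary_string_spec : Claim_equal_to_binary_string := by
  intro s _
  unfold Spec_to_binary_string to_binary_string to_binary_string_alt
  rw [PySem.List.foldl_append_singleton_eq_map]
  simp only [List.nil_append]
  rw [List.dropWhile_map]
  rw [← pv_dropWhile_eq_skip]
  have hp : ((fun c => decide (c = '0')) ∘ fun c => if is_vowel c then '0' else '1') = is_vowel := by
    funext c; exact pv_bit_pred c
  rw [hp]
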